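-- pv_equiv track=rewrite | github.com/YaraRishar/chronoclicker | clicker_utils.py | get_nearest_cages
-- ===== SOURCE A (Python) =====
-- def get_nearest_cages(current_position: tuple) -> list[tuple[int, int]]:
--     directions = (-1, -1), (-1, 0), (-1, 1), (0, -1), (0, 1), (1, -1), (1, 0), (1, 1)
--     nearest_cages = []
--     for direction in directions:
--         next_x: int = current_position[0] + direction[0]
--         next_y: int = current_position[1] + direction[1]
--         if next_x in range(1, 7) and next_y in range(1, 11):
--             nearest_cages.append((next_x, next_y))
--     return nearest_cages
-- ===== SOURCE B (Python) =====
-- def get_nearest_cages(current_position: tuple) -> list[tuple[int, int]]: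
--     cx, cy = current_position[0], current_position[1]
--     valid_x = [x for x in (cx - 1, cx, cx + 1) if x in range(1, 7)]
--     valid_y = [y for y in (cy - 1, cy, cy + 1) if y in range(1, 11)]
--     return [(x, y) for x in valid_x for y in valid_y if not (x == cx and y == cy)]
-- ===== Notes on version B (the rewrite author's own statement) =====
-- stated objective: alternative
-- what changed: Replaces the scan over 8 fixed direction offsets by two independent 1D range filters (valid x's, valid y's) combined as a Cartesian product with the center pair removed.
import Mathlib
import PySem

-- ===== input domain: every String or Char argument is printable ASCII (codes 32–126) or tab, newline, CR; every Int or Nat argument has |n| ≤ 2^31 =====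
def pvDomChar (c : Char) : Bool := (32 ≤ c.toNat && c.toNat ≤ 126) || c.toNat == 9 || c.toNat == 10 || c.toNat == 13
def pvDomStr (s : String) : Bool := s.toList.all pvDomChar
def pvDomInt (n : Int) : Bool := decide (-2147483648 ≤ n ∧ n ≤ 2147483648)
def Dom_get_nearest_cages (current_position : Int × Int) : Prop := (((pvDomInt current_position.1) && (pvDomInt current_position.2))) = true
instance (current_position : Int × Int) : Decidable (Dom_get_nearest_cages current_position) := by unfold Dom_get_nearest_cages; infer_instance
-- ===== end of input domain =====

-- ===== PORT A =====
-- B changes the decomposition only (two 1D range filters + Cartesian product); same values, O(1) either way.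
def get_nearest_cages (current_position : Int × Int) : List (Int × Int) :=
  let directions : List (Int × Int) :=
    [(-1, -1), (-1, 0), (-1, 1), (0, -1), (0, 1), (1, -1), (1, 0), (1, 1)]
  directions.foldl (fun nearest_cages direction =>
    let next_x : Int := current_position.1 + direction.1
    let next_y : Int := current_position.2 + direction.2
    if (1 ≤ next_x ∧ next_x < 7) ∧ (1 ≤ next_y ∧ next_y < 11) then
      nearest_cages ++ [(next_x, next_y)]
    else nearest_cages) []

-- ===== PORT B =====
def get_nearest_cages_alt (current_position : Int × Int) : List (Int × Int) :=
  let cx := current_position.1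
  let cy := current_position.2
  let valid_x := [cx - 1, cx, cx + 1].filter (fun x => decide (1 ≤ x ∧ x < 7))
  let valid_y := [cy - 1, cy, cy + 1].filter (fun y => decide (1 ≤ y ∧ y < 11))
  valid_x.flatMap (fun x =>
    (valid_y.filter (fun y => !(x == cx && y == cy))).map (fun y => (x, y)))

-- ===== PRECONDITION & SPEC =====
def Spec_get_nearest_cages (current_position : Int × Int) (out : List (Int × Int)) : Prop := out = get_nearest_cages_alt current_position
instance (current_position : Int × Int) (out : List (Int × Int)) : Decidable (Spec_get_nearest_cages current_position out) := by unfold Spec_get_nearest_cages; infer_instance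

-- ===== CLAIM (what is proved, stated in full; the proofs are below) =====
def Claim_equal_get_nearest_cages : Prop := ∀ (current_position : Int × Int), Dom_get_nearest_cages current_position → Spec_get_nearest_cages current_position (get_nearest_cages current_position)

-- ===== LEMMAS AND PROOFS =====

-- ===== VERDICT (by name: the statement is the Claim_ definition above) =====
set_option maxHeartbeats 2000000 in
theorem get_nearest_cages_spec : Claim_equal_get_nearest_cages := by
  intro ⟨cx, cy⟩ _
  unfold Spec_get_nearest_cages get_nearest_cages get_nearest_cages_alt
  have h1 : ((cx - 1 : Int) == cx) = false := by simp
  have h2 : ((cx + 1 : Int) == cx) = false := by simp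
  have h3 : ((cy - 1 : Int) == cy) = false := by simp
  have h4 : ((cy + 1 : Int) == cy) = false := by simp
  by_cases a1 : 1 ≤ cx - 1 ∧ cx - 1 < 7 <;>
  by_cases a2 : 1 ≤ cx ∧ cx < 7 <;>
  by_cases a3 : 1 ≤ cx + 1 ∧ cx + 1 < 7 <;>
  by_cases b1 : 1 ≤ cy - 1 ∧ cy - 1 < 11 <;>
  by_cases b2 : 1 ≤ cy ∧ cy < 11 <;>
  by_cases b3 : 1 ≤ cy + 1 ∧ cy + 1 < 11 <;>
  first
  | (exfalso; omega)
  | simp only [List.foldl, List.filter_cons, List.filter_nil, List.flatMap_cons,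
      List.flatMap_nil, List.map_cons, List.map_nil, List.append_nil, List.nil_append,
      List.cons_append, ← sub_eq_add_neg, add_zero, decide_eq_true_eq,
      a1, a2, a3, b1, b2, b3, h1, h2, h3, h4, beq_self_eq_true,
      Bool.and_false, Bool.and_true, Bool.not_false,
      Bool.not_true, if_true, if_false, and_true,
      and_false, and_self, Bool.false_eq_true]
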